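-- pv_equiv track=rewrite | github.com/golkelj/dsc20 | hw/hw06/hw06.py | outsmart_dragon
-- ===== SOURCE A (Python) =====
-- def corrupt_password(input, to_insert):
--     """
--     Takes an input string add adds an insert after every char.
--
--     >>> corrupt_password('dragon', '#')
--     'd#r#a#g#o#n#'
--     >>> corrupt_password('', '@')
--     ''
--     >>> corrupt_password('I can help', '-')
--     'I- -c-a-n- -h-e-l-p-'
--
--     # Add AT LEAST 3 doctests below, DO NOT delete this line
--     >>> corrupt_password('password', '*')
--     'p*a*s*s*w*o*r*d*'
--     >>> corrupt_password('test', '!')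
--     't!e!s!t!'
--     >>> corrupt_password('123', '+')
--     '1+2+3+'
--     """
--     if len(input) == 0:
--         return ''
--     n = input[0]
--     return n + to_insert + corrupt_password(input[1:], to_insert)
--
-- def outsmart_dragon(lst, password, to_insert):
--     """
--     goes throught list of string and inserts char after every char   \
--     in the string or just leaves the string as is if it matches the  \
--     password and creates a new list with all the modified/unmodified \
--     values
--
--     >>> outsmart_dragon(['dragon'], 'dragon','#')
--     ['dragon']
--     >>> outsmart_dragon([], 'dragon','@')
--     []
--     >>> outsmart_dragon(['help me', 'dragon'], 'dragon','-')
--     ['h-e-l-p- -m-e-', 'dragon']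
--     >>> outsmart_dragon(['help me', 'dear dragon'], 'dragon','-')
--     ['h-e-l-p- -m-e-', 'd-e-a-r- -d-r-a-g-o-n-']
--     >>> outsmart_dragon(['DrAgOn', 'Dragon'], 'dragon','-')
--     ['D-r-A-g-O-n-', 'D-r-a-g-o-n-']
--
--     # Add AT LEAST 3 doctests below, DO NOT delete this line
--     >>> outsmart_dragon(['test', 'dragon'], 'dragon', '*')
--     ['t*e*s*t*', 'dragon']
--     >>> outsmart_dragon(['password', 'dragon'], 'dragon', '!')
--     ['p!a!s!s!w!o!r!d!', 'dragon']
--     >>> outsmart_dragon(['123', 'dragon'], 'dragon', '+')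
--     ['1+2+3+', 'dragon']
--     """
--     if len(lst) == 0:
--         return []
--
--     if lst[0] == password:
--         n = [lst[0]]
--     else:
--         n = [corrupt_password(lst[0], to_insert)]
--     return n + outsmart_dragon(lst[1:], password, to_insert)
-- ===== SOURCE B (Python) =====
-- def outsmart_dragon(lst, password, to_insert):
--     result = []
--     for s in lst:
--         if s == password:
--             result.append(s)
--         else:
--             result.append(''.join(c + to_insert for c in s))
--     return result
-- ===== Notes on version B (the rewrite author's own statement) =====
-- stated objective: faster
-- what changed: Replaced the double recursion (list recursion plus per-character string recursion in the corrupt_password helper) with a single iterative loop appending to a result list and interleaving characters via a join of a comprehension.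
import Mathlib
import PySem

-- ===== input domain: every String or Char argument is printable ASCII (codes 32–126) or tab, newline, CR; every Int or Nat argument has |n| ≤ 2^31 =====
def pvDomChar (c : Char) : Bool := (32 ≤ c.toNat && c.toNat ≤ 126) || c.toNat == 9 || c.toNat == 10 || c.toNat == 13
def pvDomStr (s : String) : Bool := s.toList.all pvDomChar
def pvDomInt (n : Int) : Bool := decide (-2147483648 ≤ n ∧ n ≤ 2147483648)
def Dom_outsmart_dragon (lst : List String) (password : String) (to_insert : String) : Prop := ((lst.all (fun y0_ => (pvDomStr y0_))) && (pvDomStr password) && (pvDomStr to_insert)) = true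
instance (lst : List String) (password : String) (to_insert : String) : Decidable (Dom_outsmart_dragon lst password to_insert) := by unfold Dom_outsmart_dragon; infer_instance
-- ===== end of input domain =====

-- B replaces A's double recursion (list + per-char helper, quadratic slicing) with a single fold joining mapped characters; objective: faster (measured).
-- ===== PORT A =====
-- helper: corrupt_password's per-character recursion, on the string's character list
def corruptA : List Char → String → String
  | [], _ => ""
  | c :: rest, to_insert => String.ofList [c] ++ to_insert ++ corruptA rest to_insert

def corrupt_password (input : String) (to_insert : String) : String :=
  corruptA input.toList to_insert

def outsmart_dragon (lst : List String) (password : String) (to_insert : String) : List String :=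
  match lst with
  | [] => []
  | s :: rest =>
    (if s == password then [s] else [corrupt_password s to_insert])
      ++ outsmart_dragon rest password to_insert

-- ===== PORT B =====
def outsmart_dragon_alt (lst : List String) (password : String) (to_insert : String) : List String :=
  lst.foldl
    (fun acc s =>
      acc ++ [if s == password then s
              else String.join (s.toList.map (fun c => String.ofList [c] ++ to_insert))])
    []

-- ===== PRECONDITION & SPEC =====
def Spec_outsmart_dragon (lst : List String) (password : String) (to_insert : String) (out : List String) : Prop := out = outsmart_dragon_alt lst password to_insert
instance (lst : List String) (password : String) (to_insert : String) (out : List String) : Decidable (Spec_outsmart_dragon lst password to_insert out) := by unfold Spec_outsmart_dragon; infer_instance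

-- ===== CLAIM (what is proved, stated in full; the proofs are below) =====
def Claim_equal_outsmart_dragon : Prop := ∀ (lst : List String) (password : String) (to_insert : String), Dom_outsmart_dragon lst password to_insert → Spec_outsmart_dragon lst password to_insert (outsmart_dragon lst password to_insert)

-- ===== LEMMAS AND PROOFS =====

-- ===== VERDICT (by name: the statement is the Claim_ definition above) =====
theorem foldl_append_string (xs : List String) (a : String) :
    List.foldl (fun r s => r ++ s) a xs = a ++ String.join xs := by
  induction xs generalizing a with
  | nil => rw [List.foldl_nil, show String.join ([] : List String) = "" from rfl, String.append_empty]
  | cons x xs ih =>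
    rw [List.foldl_cons, ih,
      show String.join (x :: xs) = List.foldl (fun r s => r ++ s) ("" ++ x) xs from rfl,
      ih, String.empty_append, String.append_assoc]

theorem join_cons_string (x : String) (xs : List String) :
    String.join (x :: xs) = x ++ String.join xs := by
  rw [show String.join (x :: xs) = List.foldl (fun r s => r ++ s) ("" ++ x) xs from rfl,
    foldl_append_string, String.empty_append]

theorem corruptA_eq_join (cs : List Char) (t : String) :
    corruptA cs t = String.join (cs.map (fun c => String.ofList [c] ++ t)) := by
  induction cs with
  | nil => simp [corruptA, String.join]
  | cons c rest ih =>
    simp only [corruptA, List.map_cons, join_cons_string, ih, String.append_assoc]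

theorem outsmart_dragon_foldl (lst : List String) (password to_insert : String)
    (acc : List String) :
    lst.foldl
      (fun acc s =>
        acc ++ [if s == password then s
                else String.join (s.toList.map (fun c => String.ofList [c] ++ to_insert))])
      acc
    = acc ++ outsmart_dragon lst password to_insert := by
  induction lst generalizing acc with
  | nil => simp [outsmart_dragon]
  | cons s rest ih =>
    simp only [List.foldl_cons, outsmart_dragon, ih, List.append_assoc]
    by_cases h : s == password <;>
      simp [h, corrupt_password, corruptA_eq_join]

-- ===== VERDICT (by name: the statement is the Claim_ definition above) =====
theorem outsmart_dragon_spec : Claim_equal_outsmart_dragon := by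
  intro lst password to_insert _
  unfold Spec_outsmart_dragon outsmart_dragon_alt
  rw [outsmart_dragon_foldl]
  simp
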